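-- pv_equiv track=rewrite | github.com/JCMENDI/Proyecto-Final-Lenguajes-Formales-y-Aut-matas | Proyecto Final.py | validar_derecha_izquierda
-- ===== SOURCE A (Python) =====
-- def validar_derecha_izquierda(cadena):
--     try:
--         # 1. Separar la cadena por el #
--         partes = cadena.split('#')
--         if len(partes) != 2:
--             return False
--
--         parte_izq, parte_der = partes
--
--         # 2. La parte derecha debe ser "baaba"
--         if not parte_der.endswith("baaba"):
--             return False
--
--         # 3. Los caracteres antes de "baaba" en la parte derecha deben ser asteriscos
--         asteriscos_der = parte_der[:-5]
--         if not all(c == '*' for c in asteriscos_der):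
--             return False
--
--         # 4. La parte izquierda debe terminar en "ba"
--         if not parte_izq.endswith("ba"):
--             return False
--
--         # 5. Los caracteres antes de "ba" en la parte izquierda deben ser asteriscos
--         asteriscos_izq = parte_izq[:-2]
--         if not all(c == '*' for c in asteriscos_izq):
--             return False
--
--         return True
--     except:
--         return False
-- ===== SOURCE B (Python) =====
-- import re
--
-- # The whole grammar as one anchored regular expression: zero-or-more '*', "ba",
-- # '#', zero-or-more '*', "baaba".  fullmatch = anchored at both ends.
-- _PAT = re.compile(r'\*{0,}ba#\*{0,}baaba')
--
-- def validar_derecha_izquierda(cadena):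
--     try:
--         return _PAT.fullmatch(cadena) is not None
--     except TypeError:
--         # non-string input: A's bare except returns False there too
--         return False
-- ===== Notes on version B (the rewrite author's own statement) =====
-- stated objective: idiomatic
-- what changed: Replaced the manual split-on-'#', endswith and asterisk-scan checks by a single anchored regular expression \*{0,}ba#\*{0,}baaba matched with re.fullmatch.
import Mathlib
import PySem

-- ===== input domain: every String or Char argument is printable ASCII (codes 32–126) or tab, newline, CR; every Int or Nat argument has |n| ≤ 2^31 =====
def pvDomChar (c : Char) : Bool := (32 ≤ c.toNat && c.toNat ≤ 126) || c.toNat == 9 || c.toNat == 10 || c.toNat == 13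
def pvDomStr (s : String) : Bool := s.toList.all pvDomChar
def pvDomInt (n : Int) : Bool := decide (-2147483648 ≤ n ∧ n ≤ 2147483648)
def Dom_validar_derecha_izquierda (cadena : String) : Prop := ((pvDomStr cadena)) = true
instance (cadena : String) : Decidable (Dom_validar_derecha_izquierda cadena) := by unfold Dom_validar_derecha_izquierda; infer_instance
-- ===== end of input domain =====

-- B replaces A's manual split/endswith/asterisk-scan parsing by matching the whole
-- grammar (stars, "ba", '#', stars, "baaba") as one anchored pattern, left to right.


-- ===== PORT A =====
def validar_derecha_izquierda (cadena : String) : Bool :=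
  -- partes = cadena.split('#'); if len(partes) != 2: return False; parte_izq, parte_der = partes
  match PySem.Chars.splitOn cadena.toList "#".toList with
  | [parte_izq, parte_der] =>
    -- if not parte_der.endswith("baaba"): return False
    if PySem.Chars.endswith parte_der "baaba".toList then
      -- asteriscos_der = parte_der[:-5]; all asterisks
      if (PySem.Chars.slice parte_der none (some (-5))).all (fun c => c == '*') then
        -- if not parte_izq.endswith("ba"): return False
        if PySem.Chars.endswith parte_izq "ba".toList then
          -- asteriscos_izq = parte_izq[:-2]; all asterisks
          (PySem.Chars.slice parte_izq none (some (-2))).all (fun c => c == '*')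
        else false
      else false
    else false
  | _ => false

-- ===== PORT B =====
-- Source B matches the anchored regex \*{0,}ba#\*{0,}baaba with re.fullmatch.  The pattern is
-- deterministic ('*' never starts "ba" or "baaba"), so its exact semantics is this
-- left-to-right scan: consume the '*'-run, expect "ba#", consume the '*'-run, expect
-- exactly "baaba" and the end of the string.
def validar_derecha_izquierda_alt (cadena : String) : Bool :=
  let r1 := cadena.toList.dropWhile (fun c => c == '*')
  if r1.take 3 = ['b', 'a', '#'] then
    (r1.drop 3).dropWhile (fun c => c == '*') == ['b', 'a', 'a', 'b', 'a']
  else false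

-- ===== PRECONDITION & SPEC =====
def Spec_validar_derecha_izquierda (cadena : String) (out : Bool) : Prop := out = validar_derecha_izquierda_alt cadena
instance (cadena : String) (out : Bool) : Decidable (Spec_validar_derecha_izquierda cadena out) := by unfold Spec_validar_derecha_izquierda; infer_instance

-- ===== CLAIM (what is proved, stated in full; the proofs are below) =====
def Claim_equal_validar_derecha_izquierda : Prop := ∀ (cadena : String), Dom_validar_derecha_izquierda cadena → Spec_validar_derecha_izquierda cadena (validar_derecha_izquierda cadena)

-- ===== LEMMAS AND PROOFS =====

-- prepend x to the head part of a nonempty list of parts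
def consHead (x : List Char) : List (List Char) → List (List Char)
  | [] => [x]
  | h :: t => (x ++ h) :: t

-- reference version of str.split('#') on char lists
def splitC : List Char → List (List Char)
  | [] => [[]]
  | c :: r => if c = '#' then [] :: splitC r else consHead [c] (splitC r)

-- the common characterization: stars, "ba", '#', stars, "baaba"
def Shape (cs : List Char) : Prop :=
  ∃ k m : Nat, cs = List.replicate k '*' ++ ['b', 'a', '#'] ++ List.replicate m '*' ++ ['b', 'a', 'a', 'b', 'a']

lemma splitC_ne_nil (l : List Char) : splitC l ≠ [] := by
  induction l with
  | nil => simp [splitC]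
  | cons c r ih =>
    simp only [splitC]
    split
    · simp
    · rcases h : splitC r with _ | ⟨h0, t⟩
      · exact absurd h ih
      · simp [consHead]

lemma consHead_nil (L : List (List Char)) (h : L ≠ []) : consHead [] L = L := by
  cases L with
  | nil => exact absurd rfl h
  | cons a t => simp [consHead]

lemma consHead_consHead (x y : List Char) (L : List (List Char)) :
    consHead x (consHead y L) = consHead (x ++ y) L := by
  cases L <;> simp [consHead]

lemma go_eq (fuel : Nat) : ∀ (l cur : List Char) (accs : List (List Char)),
    l.length ≤ fuel →
    PySem.Chars.splitOn.go ['#'] fuel l cur accs = accs.reverse ++ consHead cur.reverse (splitC l) := by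
  induction fuel with
  | zero =>
    intro l cur accs h
    have : l = [] := List.length_eq_zero_iff.mp (Nat.le_zero.mp h)
    subst this
    simp [PySem.Chars.splitOn.go, splitC, consHead]
  | succ n ih =>
    intro l cur accs h
    cases l with
    | nil => simp [PySem.Chars.splitOn.go, splitC, consHead]
    | cons c rest =>
      by_cases hc : c = '#'
      · subst hc
        have hpre : List.isPrefixOf ['#'] ('#' :: rest) = true := by simp [List.isPrefixOf]
        rw [PySem.Chars.splitOn.go]
        simp only [hpre, if_true, List.length_cons, List.drop_succ_cons, List.length_nil, List.drop_zero]
        rw [ih rest [] (cur.reverse :: accs) (by simpa using h)]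
        simp only [splitC, if_true, List.reverse_cons, List.reverse_nil,
          consHead_nil _ (splitC_ne_nil rest)]
        simp [consHead]
      · have hpre : List.isPrefixOf ['#'] (c :: rest) = false := by
          simp [List.isPrefixOf]
          exact fun e => hc e.symm
        rw [PySem.Chars.splitOn.go]
        simp only [hpre, Bool.false_eq_true, if_false]
        rw [ih rest (c :: cur) accs (by simpa using h)]
        simp only [splitC, if_neg hc, List.reverse_cons]
        rw [← consHead_consHead cur.reverse [c] (splitC rest)]

lemma splitOn_eq (cs : List Char) : PySem.Chars.splitOn cs ['#'] = splitC cs := by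
  unfold PySem.Chars.splitOn
  rw [go_eq (cs.length + 1) cs [] [] (by omega)]
  simp [consHead_nil _ (splitC_ne_nil cs)]

lemma splitC_no_hash (l : List Char) (h : '#' ∉ l) : splitC l = [l] := by
  induction l with
  | nil => rfl
  | cons c r ih =>
    simp only [List.mem_cons, not_or] at h
    simp [splitC, Ne.symm h.1, ih h.2, consHead]

lemma splitC_single (l x : List Char) (h : splitC l = [x]) : l = x ∧ '#' ∉ l := by
  induction l generalizing x with
  | nil => simp [splitC] at h; simp [h]
  | cons c r ih =>
    simp only [splitC] at h
    split at h
    · rename_i hc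
      obtain ⟨h1, h2⟩ := List.cons.injEq _ _ _ _ ▸ h
      exact absurd h2 (splitC_ne_nil r)
    · rename_i hc
      rcases hs : splitC r with _ | ⟨h0, t⟩
      · exact absurd hs (splitC_ne_nil r)
      · rw [hs] at h
        simp only [consHead] at h
        obtain ⟨h1, h2⟩ := List.cons.injEq _ _ _ _ ▸ h
        rcases h2' : t with _ | _
        · subst h2'
          obtain ⟨hr, hn⟩ := ih h0 (by rw [hs])
          constructor
          · rw [← h1, hr]; rfl
          · simp only [List.mem_cons, not_or]
            exact ⟨fun e => hc e.symm, hn⟩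
        · simp [h2'] at h2

lemma splitC_pair (cs a b : List Char) :
    splitC cs = [a, b] ↔ cs = a ++ '#' :: b ∧ '#' ∉ a ∧ '#' ∉ b := by
  constructor
  · intro h
    induction cs generalizing a with
    | nil => simp [splitC] at h
    | cons c r ih =>
      simp only [splitC] at h
      split at h
      · rename_i hc
        subst hc
        obtain ⟨h1, h2⟩ := List.cons.injEq _ _ _ _ ▸ h
        obtain ⟨hr, hn⟩ := splitC_single r b h2
        exact ⟨by simp [← h1, hr], by simp [← h1], hr ▸ hn⟩
      · rename_i hc
        rcases hs : splitC r with _ | ⟨h0, t⟩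
        · exact absurd hs (splitC_ne_nil r)
        · rw [hs] at h
          simp only [consHead] at h
          obtain ⟨h1, h2⟩ := List.cons.injEq _ _ _ _ ▸ h
          rcases h2' : t with _ | ⟨t0, t1⟩
          · simp [h2'] at h2
          · subst h2'
            obtain ⟨ht0, ht1⟩ := List.cons.injEq _ _ _ _ ▸ h2
            have : splitC r = [h0, b] := by rw [hs, ht0]; rcases t1 with _ | _ <;> simp_all
            obtain ⟨hr, hna, hnb⟩ := ih h0 this
            refine ⟨?_, ?_, hnb⟩
            · rw [← h1, hr]; simp
            · rw [← h1]; simp only [List.cons_append, List.nil_append, List.mem_cons, not_or]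
              exact ⟨fun e => hc e.symm, hna⟩
  · rintro ⟨rfl, hna, hnb⟩
    induction a with
    | nil => simp [splitC, splitC_no_hash b hnb]
    | cons c a' ih =>
      simp only [List.mem_cons, not_or] at hna
      simp [splitC, Ne.symm hna.1, ih hna.2, consHead]

lemma all_star_eq_replicate (l : List Char) (h : l.all (fun c => c == '*') = true) :
    l = List.replicate l.length '*' := by
  simp only [List.all_eq_true, beq_iff_eq] at h
  exact List.eq_replicate_of_mem h

lemma dropWhile_replicate_star (k : Nat) (l : List Char) :
    (List.replicate k '*' ++ l).dropWhile (fun c => c == '*') = l.dropWhile (fun c => c == '*') := by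
  induction k with
  | zero => simp
  | succ n ih => simpa [List.replicate_succ, List.dropWhile] using ih

lemma ends_all_iff (l pat : List Char) :
    (PySem.Chars.endswith l pat = true ∧ (l.take (l.length - pat.length)).all (fun c => c == '*') = true)
    ↔ ∃ k : Nat, l = List.replicate k '*' ++ pat := by
  constructor
  · rintro ⟨he, ha⟩
    obtain ⟨pre, rfl⟩ := (PySem.Chars.endswith_iff l pat).mp he
    rw [List.length_append, Nat.add_sub_cancel, List.take_left] at ha
    exact ⟨pre.length, by rw [← all_star_eq_replicate pre ha]⟩
  · rintro ⟨k, rfl⟩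
    refine ⟨(PySem.Chars.endswith_iff _ pat).mpr ⟨_, rfl⟩, ?_⟩
    rw [List.length_append, Nat.add_sub_cancel, List.take_left]
    simp

lemma no_hash_izq (k : Nat) : '#' ∉ List.replicate k '*' ++ ['b', 'a'] := by
  simp [List.mem_append, List.mem_replicate]

lemma no_hash_der (m : Nat) : '#' ∉ List.replicate m '*' ++ ['b', 'a', 'a', 'b', 'a'] := by
  simp [List.mem_append, List.mem_replicate]

lemma shape_split (cs : List Char) :
    Shape cs ↔ ∃ k m : Nat, splitC cs =
      [List.replicate k '*' ++ ['b', 'a'], List.replicate m '*' ++ ['b', 'a', 'a', 'b', 'a']] := by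
  constructor
  · rintro ⟨k, m, rfl⟩
    refine ⟨k, m, (splitC_pair _ _ _).mpr ⟨by simp, no_hash_izq k, no_hash_der m⟩⟩
  · rintro ⟨k, m, h⟩
    obtain ⟨hcs, -, -⟩ := (splitC_pair _ _ _).mp h
    exact ⟨k, m, by simp [hcs]⟩

lemma slice5 (l : List Char) : PySem.Chars.slice l none (some (-5)) = l.take (l.length - 5) := by
  rw [PySem.Chars.slice_eq_listSlice, PySem.List.slice_to_neg_ofNat l 5 (by omega)]

lemma slice2 (l : List Char) : PySem.Chars.slice l none (some (-2)) = l.take (l.length - 2) := by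
  rw [PySem.Chars.slice_eq_listSlice, PySem.List.slice_to_neg_ofNat l 2 (by omega)]

lemma A_char (s : String) : validar_derecha_izquierda s = true ↔ Shape s.toList := by
  unfold validar_derecha_izquierda
  rw [show ("#".toList) = ['#'] from rfl, splitOn_eq]
  rcases hp : splitC s.toList with _ | ⟨a, _ | ⟨b, _ | ⟨c, t⟩⟩⟩
  · exact absurd hp (splitC_ne_nil _)
  · simp only [Bool.false_eq_true, false_iff]
    rintro hsh
    obtain ⟨k, m, h⟩ := (shape_split _).mp hsh
    rw [hp] at h; exact absurd h (by simp)
  · constructor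
    · intro h
      dsimp only at h
      split_ifs at h with h1 h2 h3
      rw [slice2] at h
      rw [slice5] at h2
      obtain ⟨k, ha⟩ := (ends_all_iff a ['b', 'a']).mp ⟨h3, by simpa using h⟩
      obtain ⟨m, hb⟩ := (ends_all_iff b ['b', 'a', 'a', 'b', 'a']).mp ⟨h1, by simpa using h2⟩
      exact (shape_split _).mpr ⟨k, m, by rw [hp, ha, hb]⟩
    · intro hsh
      obtain ⟨k, m, h⟩ := (shape_split _).mp hsh
      rw [hp] at h
      obtain ⟨rfl, rfl⟩ : a = List.replicate k '*' ++ ['b', 'a'] ∧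
          b = List.replicate m '*' ++ ['b', 'a', 'a', 'b', 'a'] := by
        constructor <;> simp_all
      obtain ⟨he2, ha2⟩ := (ends_all_iff (List.replicate k '*' ++ ['b', 'a']) ['b', 'a']).mpr ⟨k, rfl⟩
      obtain ⟨he5, ha5⟩ := (ends_all_iff (List.replicate m '*' ++ ['b', 'a', 'a', 'b', 'a'])
        ['b', 'a', 'a', 'b', 'a']).mpr ⟨m, rfl⟩
      dsimp only
      rw [if_pos (by simpa using he5), if_pos (by rw [slice5]; simpa using ha5),
        if_pos (by simpa using he2), slice2]
      simpa using ha2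
  · simp only [Bool.false_eq_true, false_iff]
    rintro hsh
    obtain ⟨k, m, h⟩ := (shape_split _).mp hsh
    rw [hp] at h; exact absurd h (by simp)

lemma takeWhile_star_replicate (l : List Char) :
    l.takeWhile (fun c => c == '*') = List.replicate (l.takeWhile (fun c => c == '*')).length '*' := by
  apply all_star_eq_replicate
  simp only [List.all_eq_true]
  exact fun c hc => List.mem_takeWhile_imp (p := fun c => c == '*') hc

lemma B_char (s : String) : validar_derecha_izquierda_alt s = true ↔ Shape s.toList := by
  unfold validar_derecha_izquierda_alt
  constructor
  · intro h
    dsimp only at h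
    split_ifs at h with h1
    rw [beq_iff_eq] at h
    set d := s.toList.dropWhile (fun c => c == '*') with hd
    have hcs : s.toList = s.toList.takeWhile (fun c => c == '*') ++ d := by
      rw [hd, List.takeWhile_append_dropWhile]
    have hd3 : d = ['b', 'a', '#'] ++ d.drop 3 := by
      conv_lhs => rw [← List.take_append_drop 3 d, h1]
    have hr : d.drop 3 = (d.drop 3).takeWhile (fun c => c == '*') ++ ['b', 'a', 'a', 'b', 'a'] := by
      conv_lhs => rw [← List.takeWhile_append_dropWhile (p := fun c => c == '*') (l := d.drop 3), h]
    refine ⟨(s.toList.takeWhile (fun c => c == '*')).length,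
      ((d.drop 3).takeWhile (fun c => c == '*')).length, ?_⟩
    conv_lhs => rw [hcs, hd3, hr]
    rw [← takeWhile_star_replicate, ← takeWhile_star_replicate]
    simp
  · rintro ⟨k, m, hs⟩
    rw [hs]
    have h1 : (List.replicate k '*' ++ ['b', 'a', '#'] ++ List.replicate m '*' ++
        ['b', 'a', 'a', 'b', 'a']).dropWhile (fun c => c == '*')
        = 'b' :: 'a' :: '#' :: (List.replicate m '*' ++ ['b', 'a', 'a', 'b', 'a']) := by
      rw [List.append_assoc, List.append_assoc, dropWhile_replicate_star]
      simp [List.dropWhile]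
    dsimp only
    rw [h1]
    rw [if_pos (by simp)]
    simp only [List.drop_succ_cons, List.drop_zero]
    rw [dropWhile_replicate_star]
    simp [List.dropWhile]

-- ===== VERDICT (by name: the statement is the Claim_ definition above) =====
theorem validar_derecha_izquierda_spec : Claim_equal_validar_derecha_izquierda := by
  intro s _
  unfold Spec_validar_derecha_izquierda
  have h := (A_char s).trans (B_char s).symm
  cases hA : validar_derecha_izquierda s <;> cases hB : validar_derecha_izquierda_alt s <;> simp_all
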